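-- pv_equiv track=rewrite | github.com/kerowam/Advent_of_Code | 2024/Day22/calculate_most_bananas_to_get_2.py | calculate_secret_number
-- ===== SOURCE A (Python) =====
-- def calculate_secret_number(number, limit, total_changes):
-- 	secret_number = number
-- 	last_number = number % 10
-- 	sequence = list()
-- 	changes = set()
-- 	for i in range(limit):
-- 		mix_number = secret_number * 64
-- 		secret_number = secret_number ^ mix_number
-- 		if secret_number >= 16777216:
-- 			secret_number = secret_number % 16777216
-- 		mix_number = secret_number // 32
-- 		secret_number = secret_number ^ mix_number
-- 		if secret_number >= 16777216:
-- 			secret_number = secret_number % 16777216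
-- 		mix_number = secret_number * 2048
-- 		secret_number = secret_number ^ mix_number
-- 		if secret_number >= 16777216:
-- 			secret_number = secret_number % 16777216
-- 		current_number = secret_number % 10
-- 		if len(sequence) < 4:
-- 			sequence.append(current_number - last_number)
-- 		else:
-- 			sequence.pop(0)
-- 			sequence.append(current_number - last_number)
-- 		if len(sequence) == 4 and tuple(sequence) not in changes:
-- 			changes.add(tuple(sequence))
-- 			if tuple(sequence) not in total_changes:
-- 				total_changes[tuple(sequence)] = current_number
-- 			else:
-- 				total_changes[tuple(sequence)] += current_number
-- 		last_number = current_number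
-- 	return total_changes
-- ===== SOURCE B (Python) =====
-- def calculate_secret_number(number, limit, total_changes):
-- 	prices = [number % 10]
-- 	secret = number
-- 	for _ in range(limit):
-- 		secret ^= secret * 64
-- 		if secret >= 16777216:
-- 			secret %= 16777216
-- 		secret ^= secret // 32
-- 		if secret >= 16777216:
-- 			secret %= 16777216
-- 		secret ^= secret * 2048
-- 		if secret >= 16777216:
-- 			secret %= 16777216
-- 		prices.append(secret % 10)
-- 	changes = [b - a for a, b in zip(prices, prices[1:])]
-- 	seen = set()
-- 	for i in range(3, len(changes)):
-- 		window = tuple(changes[i - 3:i + 1])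
-- 		if window not in seen:
-- 			seen.add(window)
-- 			if window in total_changes:
-- 				total_changes[window] += prices[i + 1]
-- 			else:
-- 				total_changes[window] = prices[i + 1]
-- 	return total_changes
-- ===== Notes on version B (the rewrite author's own statement) =====
-- stated objective: alternative
-- what changed: A interleaves everything in one loop carrying a sliding 4-change deque; B first generates the full price list from the secret-number recurrence, derives the change list by zipping consecutive prices, and then scans length-4 windows by slicing, crediting the price at each window's end on first occurrence.
import Mathlib
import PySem

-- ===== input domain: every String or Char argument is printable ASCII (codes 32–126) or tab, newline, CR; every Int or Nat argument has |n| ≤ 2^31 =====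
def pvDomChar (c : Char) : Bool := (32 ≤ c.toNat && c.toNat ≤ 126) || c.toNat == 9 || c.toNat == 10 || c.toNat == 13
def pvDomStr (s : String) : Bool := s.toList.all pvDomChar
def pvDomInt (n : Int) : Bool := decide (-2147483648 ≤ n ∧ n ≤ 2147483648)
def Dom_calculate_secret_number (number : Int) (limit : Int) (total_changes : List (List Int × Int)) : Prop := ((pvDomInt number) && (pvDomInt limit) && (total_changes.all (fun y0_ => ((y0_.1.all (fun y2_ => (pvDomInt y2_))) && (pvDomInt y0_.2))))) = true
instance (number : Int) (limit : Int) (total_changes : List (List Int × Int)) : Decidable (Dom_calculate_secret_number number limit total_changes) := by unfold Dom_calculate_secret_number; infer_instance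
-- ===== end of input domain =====

-- B restructures A's single interleaved loop as: generate the price list, zip it into a
-- change list, then scan length-4 windows by slicing (objective: alternative decomposition).
-- Both Pythons mutate the total_changes dict in place and return it; the equivalence proved
-- here is about the returned association list (identical mutation sequence in both).

-- The three-line secret scramble, identical (inline) in both Python sources; shared here.
def pvScramble (secret : Int) : Int :=
  let s1 := PySem.Int.bxor secret (secret * 64)
  let s1 := if 16777216 ≤ s1 then PySem.Int.mod s1 16777216 else s1
  let s2 := PySem.Int.bxor s1 (PySem.Int.floordiv s1 32)
  let s2 := if 16777216 ≤ s2 then PySem.Int.mod s2 16777216 else s2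
  let s3 := PySem.Int.bxor s2 (s2 * 2048)
  let s3 := if 16777216 ≤ s3 then PySem.Int.mod s3 16777216 else s3
  s3

-- ===== PORT A =====
-- A's loop 'for i in range(limit)' never uses i, so it is recursion on the iteration count.
def pvA_loop (n : Nat) (secret last : Int) (sequence : List Int)
    (changes : PySem.Set (List Int)) (tc : PySem.Dict (List Int) Int) :
    PySem.Dict (List Int) Int :=
  match n with
  | 0 => tc
  | n + 1 =>
    let s := pvScramble secret
    let current := PySem.Int.mod s 10
    -- sequence.pop(0) then append = tail ++ [·]
    let seq' := if sequence.length < 4 then sequence ++ [current - last]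
                else sequence.tail ++ [current - last]
    let ct :=
      if seq'.length == 4 && !(PySem.Set.contains changes seq') then
        (PySem.Set.add changes seq',
         if tc.contains seq' = false then tc.insert seq' current
         else tc.insert seq' (tc.getD seq' 0 + current))
      else (changes, tc)
    pvA_loop n s current seq' ct.1 ct.2

def calculate_secret_number (number : Int) (limit : Int) (total_changes : List (List Int × Int)) : List (List Int × Int) :=
  (pvA_loop limit.toNat number (PySem.Int.mod number 10) [] PySem.Set.empty
    (PySem.Dict.mk total_changes)).items

-- ===== PORT B =====
-- first loop of Source B: append secret % 10 to prices, limit times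
def pvB_gen (n : Nat) (secret : Int) (prices : List Int) : List Int :=
  match n with
  | 0 => prices
  | n + 1 =>
    let s := pvScramble secret
    pvB_gen n s (prices ++ [PySem.Int.mod s 10])

def calculate_secret_number_alt (number : Int) (limit : Int) (total_changes : List (List Int × Int)) : List (List Int × Int) :=
  let prices := pvB_gen limit.toNat number [PySem.Int.mod number 10]
  let changes := (prices.zip (PySem.List.slice prices (some 1) none)).map (fun p => p.2 - p.1)
  let res := (PySem.List.pyRange 3 (changes.length : Int) 1).foldl
    (fun (st : PySem.Set (List Int) × PySem.Dict (List Int) Int) i =>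
      let window := PySem.List.slice changes (some (i - 3)) (some (i + 1))
      if PySem.Set.contains st.1 window then st
      else
        (PySem.Set.add st.1 window,
         if st.2.contains window then
           st.2.insert window (st.2.getD window 0 + PySem.List.pyGetD prices (i + 1) 0)
         else st.2.insert window (PySem.List.pyGetD prices (i + 1) 0)))
    (PySem.Set.empty, PySem.Dict.mk total_changes)
  res.2.items

-- ===== PRECONDITION & SPEC =====
def Spec_calculate_secret_number (number : Int) (limit : Int) (total_changes : List (List Int × Int)) (out : List (List Int × Int)) : Prop := out = calculate_secret_number_alt number limit total_changes
instance (number : Int) (limit : Int) (total_changes : List (List Int × Int)) (out : List (List Int × Int)) : Decidable (Spec_calculate_secret_number number limit total_changes out) := by unfold Spec_calculate_secret_number; infer_instance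

-- ===== CLAIM (what is proved, stated in full; the proofs are below) =====
def Claim_equal_calculate_secret_number : Prop := ∀ (number : Int) (limit : Int) (total_changes : List (List Int × Int)), Dom_calculate_secret_number number limit total_changes → Spec_calculate_secret_number number limit total_changes (calculate_secret_number number limit total_changes)

-- ===== LEMMAS AND PROOFS =====

-- the secret after k rounds, its price, and the k-th change
def pvS (number : Int) : Nat → Int
  | 0 => number
  | k + 1 => pvScramble (pvS number k)

def pvP (number : Int) (k : Nat) : Int := PySem.Int.mod (pvS number k) 10

def pvC (number : Int) (k : Nat) : Int := pvP number (k + 1) - pvP number k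

-- A's `sequence` after k iterations: the last (at most 4) changes
def pvSeq (number : Int) (k : Nat) : List Int := ((List.range k).map (pvC number)).drop (k - 4)

-- the common per-window update (index i is the iteration / window-end index)
def pvUpd (number : Int) (st : PySem.Set (List Int) × PySem.Dict (List Int) Int) (i : Nat) :
    PySem.Set (List Int) × PySem.Dict (List Int) Int :=
  if 3 ≤ i then
    let w := pvSeq number (i + 1)
    if PySem.Set.contains st.1 w then st
    else
      (PySem.Set.add st.1 w,
       if st.2.contains w = false then st.2.insert w (pvP number (i + 1))
       else st.2.insert w (st.2.getD w 0 + pvP number (i + 1)))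
  else st

theorem pvSeq_length (number : Int) (k : Nat) : (pvSeq number k).length = min k 4 := by
  unfold pvSeq
  rw [List.length_drop, List.length_map, List.length_range]
  omega

theorem pvSeq_succ (number : Int) (k : Nat) :
    pvSeq number (k + 1) =
      (if (pvSeq number k).length < 4 then pvSeq number k ++ [pvC number k]
       else (pvSeq number k).tail ++ [pvC number k]) := by
  have hlen := pvSeq_length number k
  rw [hlen]
  simp only [pvSeq, List.range_succ, List.map_append, List.map_cons, List.map_nil]
  by_cases h : k < 4
  · rw [if_pos (by omega)]
    have h1 : k + 1 - 4 = 0 := by omega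
    have h2 : k - 4 = 0 := by omega
    simp [h1, h2]
  · rw [if_neg (by omega)]
    have h1 : k + 1 - 4 = (k - 4) + 1 := by omega
    rw [h1, List.drop_append_of_le_length (by simp; omega), List.tail_drop]

theorem pvA_char (number : Int) (n k : Nat) (seen : PySem.Set (List Int))
    (tc : PySem.Dict (List Int) Int) :
    pvA_loop n (pvS number k) (pvP number k) (pvSeq number k) seen tc =
      ((List.range' k n).foldl (pvUpd number) (seen, tc)).2 := by
  induction n generalizing k seen tc with
  | zero => simp [pvA_loop]
  | succ n ih =>
    rw [List.range'_succ, List.foldl_cons]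
    show pvA_loop (n + 1) (pvS number k) (pvP number k) (pvSeq number k) seen tc = _
    rw [pvA_loop]
    have hscr : pvScramble (pvS number k) = pvS number (k + 1) := rfl
    have hcur : PySem.Int.mod (pvS number (k + 1)) 10 = pvP number (k + 1) := rfl
    have hseq : (if (pvSeq number k).length < 4 then pvSeq number k ++ [pvP number (k+1) - pvP number k]
                 else (pvSeq number k).tail ++ [pvP number (k+1) - pvP number k]) = pvSeq number (k + 1) := by
      rw [pvSeq_succ]; rfl
    simp only [hscr, hcur, hseq]
    rw [ih (k + 1)]
    congr 1
    -- the state after one A-iteration equals pvUpd number (seen, tc) k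
    have hlen : (pvSeq number (k + 1)).length = min (k + 1) 4 := pvSeq_length number (k + 1)
    by_cases h3 : 3 ≤ k
    · have h4 : ((pvSeq number (k + 1)).length == 4) = true := by simp [hlen]; omega
      by_cases hc : PySem.Set.contains seen (pvSeq number (k + 1)) = true
      · simp [pvUpd, h3, h4]
      · have hc' : PySem.Set.contains seen (pvSeq number (k + 1)) = false :=
          Bool.not_eq_true _ ▸ eq_false_of_ne_true hc
        simp [pvUpd, h3, h4]
    · have h4 : ((pvSeq number (k + 1)).length == 4) = false := by simp [hlen]; omega
      simp [pvUpd, h4, h3]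

theorem pvB_gen_char (number : Int) (n k : Nat) (prices : List Int) :
    pvB_gen n (pvS number k) prices =
      prices ++ (List.range' (k + 1) n).map (pvP number) := by
  induction n generalizing k prices with
  | zero => simp [pvB_gen]
  | succ n ih =>
    rw [pvB_gen]
    show pvB_gen n (pvS number (k + 1)) (prices ++ [pvP number (k + 1)]) = _
    rw [ih (k + 1), List.range'_succ]
    simp

theorem pvPrices_eq (number : Int) (n : Nat) :
    pvB_gen n number [PySem.Int.mod number 10] = (List.range (n + 1)).map (pvP number) := by
  have h := pvB_gen_char number n 0 [PySem.Int.mod number 10]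
  simp only [pvS] at h
  rw [h, List.range_eq_range', List.range'_succ, List.map_cons]
  simp [pvP, pvS, List.range'_eq_map_range]

theorem pvChanges_eq (number : Int) (n : Nat) :
    (((List.range (n + 1)).map (pvP number)).zip
        (PySem.List.slice ((List.range (n + 1)).map (pvP number)) (some 1) none)).map
      (fun p => p.2 - p.1) = (List.range n).map (pvC number) := by
  rw [PySem.List.slice_from_one]
  apply List.ext_getElem
  · simp
  · intro i h1 h2
    simp only [List.getElem_map, List.getElem_zip, List.getElem_tail, List.getElem_range]
    rfl

-- the window slice at index k+3 is pvSeq at k+4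
theorem pvWindow_eq (number : Int) (n k : Nat) (hk : k + 4 ≤ n) :
    PySem.List.slice ((List.range n).map (pvC number)) (some ((3 : Int) + k - 3))
        (some ((3 : Int) + k + 1)) = pvSeq number (k + 4) := by
  have h1 : ((3 : Int) + k - 3) = ((k : Nat) : Int) := by omega
  have h2 : ((3 : Int) + k + 1) = (((k + 4 : Nat) : Int)) := by omega
  rw [h1, h2, PySem.List.slice_natCast]
  unfold pvSeq
  apply List.ext_getElem
  · simp; omega
  · intro i hl hr
    simp only [List.getElem_take, List.getElem_drop, List.getElem_map, List.getElem_range,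
      Nat.add_sub_cancel]

theorem pvSkip (number : Int) (n : Nat) (st : PySem.Set (List Int) × PySem.Dict (List Int) Int) :
    (List.range' 0 n).foldl (pvUpd number) st =
      (List.range' 3 (n - 3)).foldl (pvUpd number) st := by
  by_cases h : 3 ≤ n
  · conv_lhs => rw [show n = 3 + (n - 3) by omega]
    rw [← List.range'_append (s := 0) (m := 3) (n := n - 3) (step := 1), List.foldl_append]
    norm_num
    have hid : List.foldl (pvUpd number) st (List.range' 0 3) = st := by
      simp [List.range', pvUpd]
    rw [hid]
  · have hn3 : n - 3 = 0 := by omega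
    rw [hn3]
    interval_cases n <;> simp [List.range', pvUpd]

theorem pvB_char (number : Int) (n : Nat) (tc : PySem.Dict (List Int) Int) :
    ((PySem.List.pyRange 3 ((n : Nat) : Int) 1).foldl
      (fun (st : PySem.Set (List Int) × PySem.Dict (List Int) Int) i =>
        let window := PySem.List.slice ((List.range n).map (pvC number)) (some (i - 3)) (some (i + 1))
        if PySem.Set.contains st.1 window then st
        else
          (PySem.Set.add st.1 window,
           if st.2.contains window then
             st.2.insert window (st.2.getD window 0 + PySem.List.pyGetD ((List.range (n+1)).map (pvP number)) (i + 1) 0)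
           else st.2.insert window (PySem.List.pyGetD ((List.range (n+1)).map (pvP number)) (i + 1) 0)))
      (PySem.Set.empty, tc)) =
    (List.range' 3 (n - 3)).foldl (pvUpd number) (PySem.Set.empty, tc) := by
  rw [PySem.List.pyRange_one, List.foldl_map]
  have hn : (((n : Nat) : Int) - 3).toNat = n - 3 := by omega
  rw [hn]
  rw [List.range'_eq_map_range, List.foldl_map]
  apply PySem.List.foldl_congr_mem
  intro st k hk
  have hkn : k + 4 ≤ n := by
    have := List.mem_range.mp hk; omega
  simp only []
  rw [pvWindow_eq number n k hkn]
  have hidx : (3 : Int) + k + 1 = (((k + 4 : Nat)) : Int) := by omega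
  have hget : PySem.List.pyGetD ((List.range (n+1)).map (pvP number)) ((3 : Int) + k + 1) 0 = pvP number (k + 4) := by
    rw [hidx, PySem.List.pyGetD_natCast]
    rw [List.getD_eq_getElem?_getD, List.getElem?_map, List.getElem?_range (by omega)]
    rfl
  rw [hget]
  show _ = pvUpd number st (3 + k)
  have hw : 3 + k + 1 = k + 4 := by omega
  conv_rhs => rw [pvUpd, if_pos (show 3 ≤ 3 + k by omega)]
  rw [hw]
  cases hc : PySem.Set.contains st.1 (pvSeq number (k + 4)) with
  | true =>
    have hm : pvSeq number (k + 4) ∈ st.1 := (PySem.Set.contains_iff st.1 (pvSeq number (k + 4))).mp hc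
    simp [hm]
  | false =>
    have hm : pvSeq number (k + 4) ∉ st.1 := by
      intro h
      exact absurd ((PySem.Set.contains_iff st.1 (pvSeq number (k + 4))).mpr h) (by simp only [hc]; exact Bool.false_ne_true)
    cases hd : st.2.contains (pvSeq number (k + 4)) with
    | true => simp [hd, hm]
    | false => simp [hd, hm]

-- ===== VERDICT (by name: the statement is the Claim_ definition above) =====
theorem calculate_secret_number_spec : Claim_equal_calculate_secret_number := by
  intro number limit total_changes _
  unfold Spec_calculate_secret_number calculate_secret_number calculate_secret_number_alt
  set n := limit.toNat with hn
  rw [pvPrices_eq number n]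
  simp only []
  rw [pvChanges_eq number n]
  have hlen : ((List.range n).map (pvC number)).length = n := by simp
  rw [hlen]
  rw [pvB_char number n (PySem.Dict.mk total_changes)]
  have hA := pvA_char number n 0 PySem.Set.empty (PySem.Dict.mk total_changes)
  have h0 : pvS number 0 = number := rfl
  have h1 : pvP number 0 = PySem.Int.mod number 10 := rfl
  have h2 : pvSeq number 0 = [] := rfl
  rw [h0, h1, h2] at hA
  rw [hA, pvSkip]
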